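-- pv_equiv track=rewrite | github.com/minho00123/Baejoon_Algorithm_Solutions | 프로그래머스/unrated/181864. 문자열 바꿔서 찾기/문자열 바꿔서 찾기.py | solution
-- ===== SOURCE A (Python) =====
-- def solution(myString, pat):
--     revString = ''
--     for i in range(len(myString)):
--         if myString[i] == 'A':
--             revString += 'B'
--         elif myString[i] == 'B':
--             revString += 'A'
--         else:
--             revString += myString[i]
--     if revString.find(pat) == -1:
--         return 0
--     else:
--         return 1
-- ===== SOURCE B (Python) =====
-- def solution(myString, pat):
--     swapped_pat = ''.join('B' if c == 'A' else 'A' if c == 'B' else c for c in pat)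
--     return 1 if swapped_pat in myString else 0
-- ===== Notes on version B (the rewrite author's own statement) =====
-- stated objective: simpler
-- what changed: Instead of rebuilding the whole myString with A/B swapped and searching pat in the rebuilt copy, B swaps A/B in the (shorter) pattern and tests membership directly in the untouched myString, exploiting that the swap is an involution.
import Mathlib
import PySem

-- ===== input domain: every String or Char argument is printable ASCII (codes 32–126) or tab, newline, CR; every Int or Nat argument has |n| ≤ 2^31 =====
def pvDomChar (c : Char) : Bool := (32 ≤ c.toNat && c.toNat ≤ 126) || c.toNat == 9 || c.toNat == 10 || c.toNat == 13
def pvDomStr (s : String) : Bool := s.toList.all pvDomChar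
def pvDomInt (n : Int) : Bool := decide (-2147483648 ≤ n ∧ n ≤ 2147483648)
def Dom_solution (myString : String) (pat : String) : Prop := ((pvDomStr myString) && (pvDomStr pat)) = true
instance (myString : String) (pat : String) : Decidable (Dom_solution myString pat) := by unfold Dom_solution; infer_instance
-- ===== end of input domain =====

-- B swaps A/B in the pattern instead of rebuilding myString (swap is an involution); same return value, simpler.
-- ===== PORT A =====
def solution (myString : String) (pat : String) : Int :=
  let rev : List Char := myString.toList.foldl
    (fun acc c =>
      if c = 'A' then acc ++ ['B']
      else if c = 'B' then acc ++ ['A']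
      else acc ++ [c]) []
  if PySem.Chars.find rev pat.toList = -1 then 0 else 1

-- ===== PORT B =====
def pvSwapAB (c : Char) : Char :=
  if c = 'A' then 'B' else if c = 'B' then 'A' else c

def solution_alt (myString : String) (pat : String) : Int :=
  let swappedPat : List Char := pat.toList.map pvSwapAB
  if PySem.Chars.isIn swappedPat myString.toList then 1 else 0

-- ===== PRECONDITION & SPEC =====
def Spec_solution (myString : String) (pat : String) (out : Int) : Prop := out = solution_alt myString pat
instance (myString : String) (pat : String) (out : Int) : Decidable (Spec_solution myString pat out) := by unfold Spec_solution; infer_instance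

-- ===== CLAIM (what is proved, stated in full; the proofs are below) =====
def Claim_equal_solution : Prop := ∀ (myString : String) (pat : String), Dom_solution myString pat → Spec_solution myString pat (solution myString pat)

-- ===== LEMMAS AND PROOFS =====
theorem pvSwapAB_invol (c : Char) : pvSwapAB (pvSwapAB c) = c := by
  unfold pvSwapAB; split_ifs with h1 h2 <;> simp_all

theorem map_swap_invol (l : List Char) : (l.map pvSwapAB).map pvSwapAB = l := by
  simp [List.map_map, Function.comp_def, pvSwapAB_invol]

theorem infix_map_swap_iff (p s : List Char) :
    p <:+: s.map pvSwapAB ↔ p.map pvSwapAB <:+: s := by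
  constructor
  · intro h
    have := h.map pvSwapAB
    rwa [map_swap_invol] at this
  · intro h
    have := h.map pvSwapAB
    rwa [map_swap_invol] at this

theorem rev_eq_map (l : List Char) (acc : List Char) :
    l.foldl (fun acc c =>
      if c = 'A' then acc ++ ['B']
      else if c = 'B' then acc ++ ['A']
      else acc ++ [c]) acc = acc ++ l.map pvSwapAB := by
  induction l generalizing acc with
  | nil => simp
  | cons c t ih =>
    simp only [List.foldl_cons, List.map_cons, ih, pvSwapAB]
    split_ifs <;> simp

-- ===== VERDICT (by name: the statement is the Claim_ definition above) =====
theorem solution_spec : Claim_equal_solution := by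
  intro myString pat _
  unfold Spec_solution solution solution_alt
  simp only [rev_eq_map, List.nil_append]
  by_cases h : pat.toList <:+: myString.toList.map pvSwapAB
  · rw [if_neg (by rw [PySem.Chars.find_eq_neg_one_iff]; simpa using h),
        if_pos (by rw [PySem.Chars.isIn_iff_infix]; exact (infix_map_swap_iff _ _).mp h)]
  · rw [if_pos (by rw [PySem.Chars.find_eq_neg_one_iff]; simpa using h),
        if_neg (by simp only [PySem.Chars.isIn_iff_infix]
                   exact fun hc => h ((infix_map_swap_iff _ _).mpr hc))]
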